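-- pv_equiv track=rewrite | github.com/amazon-science/summarization-sicf-score | SSDS/SiCF/sicf_score.py | select_extract_entities
-- ===== SOURCE A (Python) =====
-- from collections import Counter
--
-- def select_extract_entities(src_phrase):
--     phrase = src_phrase[0]
--     phrase = list(phrase)
--
--     type = src_phrase[1]
--
--     src_dict = {}
--
--     for i in range(len(phrase)):
--         if phrase[i] in src_dict.keys() and 'NNP' in src_dict[phrase[i]]:
--             continue
--         src_dict[phrase[i]] = type[i]
--
--     occurances = Counter(phrase)
--     for ele in occurances.keys():
--         if 'NNP' in src_dict[ele]:
--             occurances[ele] = 1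
--
--
--     return occurances
-- ===== SOURCE B (Python) =====
-- from collections import Counter
--
-- def select_extract_entities(src_phrase):
--     phrase = list(src_phrase[0])
--     types = src_phrase[1]
--
--     occurances = Counter(phrase)
--     for ele in occurances.keys():
--         # a word counts as an entity iff any of its occurrences was tagged 'NNP'
--         if any('NNP' in types[i] for i, x in enumerate(phrase) if x == ele):
--             occurances[ele] = 1
--     return occurances
-- ===== Notes on version B (the rewrite author's own statement) =====
-- stated objective: alternative
-- what changed: B has no first pass and no word->type state at all: for each distinct word of the Counter it re-scans enumerate(phrase) with a short-circuiting any() asking whether some occurrence of that word was tagged with an 'NNP'-containing type, whereas A builds a frozen word->type dict in a first pass and substring-tests its stored values.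
import Mathlib
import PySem

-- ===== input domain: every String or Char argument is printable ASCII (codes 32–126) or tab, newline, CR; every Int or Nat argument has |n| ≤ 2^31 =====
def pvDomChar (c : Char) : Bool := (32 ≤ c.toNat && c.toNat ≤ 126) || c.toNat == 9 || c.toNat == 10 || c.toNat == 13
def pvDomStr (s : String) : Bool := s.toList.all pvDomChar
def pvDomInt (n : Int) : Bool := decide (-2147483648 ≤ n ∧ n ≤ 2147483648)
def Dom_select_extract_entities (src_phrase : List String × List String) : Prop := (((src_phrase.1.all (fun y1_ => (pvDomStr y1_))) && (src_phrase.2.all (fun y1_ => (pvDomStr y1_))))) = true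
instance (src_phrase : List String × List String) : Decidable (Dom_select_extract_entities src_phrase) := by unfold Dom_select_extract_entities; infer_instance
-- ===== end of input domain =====

-- B drops A's stateful word->type dict (and its freeze/continue logic) entirely: for each
-- distinct word it re-scans enumerate(phrase) with a short-circuiting any() to ask whether
-- some occurrence was tagged with an 'NNP'-containing type (objective: alternative).

-- ===== PORT A =====
-- A's first loop: 'for i in range(len(phrase)): if phrase[i] in src_dict and "NNP" in src_dict[phrase[i]]: continue; src_dict[phrase[i]] = type[i]'.
-- type[i] out of range = IndexError → none (excluded by Pre_).
def seeDictLoop (phrase typ : List String) : List Nat → PySem.Dict String String → Option (PySem.Dict String String)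
  | [], d => some d
  | i :: rest, d =>
    let w := phrase.getD i ""
    if (d.get? w).elim false (fun t => PySem.Str.isIn "NNP" t) then
      seeDictLoop phrase typ rest d
    else
      match PySem.List.pyGet? typ (i : Int) with
      | none => none
      | some t => seeDictLoop phrase typ rest (d.insert w t)

def select_extract_entities (src_phrase : List String × List String) : List (String × Int) :=
  let phrase := src_phrase.1
  let typ := src_phrase.2
  match seeDictLoop phrase typ (List.range phrase.length) PySem.Dict.empty with
  | none => []   -- Python A raises IndexError here; these inputs lie outside Pre_
  | some d =>
    let occ := PySem.Dict.counter phrase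
    -- 'for ele in occurances.keys(): if "NNP" in src_dict[ele]: occurances[ele] = 1';
    -- every counter key was inserted into src_dict, so src_dict[ele] never raises: getD "" is exact.
    (occ.keys.foldl (fun o k =>
      if PySem.Str.isIn "NNP" ((d.get? k).getD "") then o.insert k (1 : Int) else o) occ).items

-- ===== PORT B =====
-- B's generator: any('NNP' in types[i] for i, x in enumerate(phrase) if x == ele) —
-- short-circuits at the first 'NNP' hit; types[i] out of range = IndexError → none (outside Pre_).
def altAnyNNP (typ : List String) (w : String) : List (Int × String) → Option Bool
  | [] => some false
  | (i, x) :: rest =>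
    if x == w then
      match PySem.List.pyGet? typ i with
      | none => none
      | some t => if PySem.Str.isIn "NNP" t then some true else altAnyNNP typ w rest
    else altAnyNNP typ w rest

-- B's key loop: 'for ele in occurances.keys(): if any(...): occurances[ele] = 1'.
def altKeyLoop (phrase typ : List String) : List String → PySem.Dict String Int → Option (PySem.Dict String Int)
  | [], o => some o
  | k :: rest, o =>
    match altAnyNNP typ k (PySem.List.enumerate phrase) with
    | none => none
    | some b => altKeyLoop phrase typ rest (if b then o.insert k (1 : Int) else o)

def select_extract_entities_alt (src_phrase : List String × List String) : List (String × Int) :=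
  let phrase := src_phrase.1
  let typ := src_phrase.2
  let occ := PySem.Dict.counter phrase
  match altKeyLoop phrase typ occ.keys occ with
  | none => []   -- IndexError in Python B, outside Pre_
  | some o => o.items

-- ===== PRECONDITION & SPEC =====
-- Pre_ excludes exactly the inputs where Python A raises IndexError: a position i of phrase with
-- type[i] out of range and no earlier in-range occurrence of the same word whose type contains 'NNP'.
def Pre_select_extract_entities (src_phrase : List String × List String) : Prop :=
  ∀ i < src_phrase.1.length, i < src_phrase.2.length ∨
    ∃ j < i, j < src_phrase.2.length ∧ src_phrase.1.getD j "" = src_phrase.1.getD i "" ∧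
      PySem.Str.isIn "NNP" (src_phrase.2.getD j "") = true
instance (src_phrase : List String × List String) : Decidable (Pre_select_extract_entities src_phrase) := by
  unfold Pre_select_extract_entities; infer_instance
def pvWitness_select_extract_entities : (List String × List String) := (["a", "b", "a"], ["NNP", "NN", "VB"])

def Spec_select_extract_entities (src_phrase : List String × List String) (out : List (String × Int)) : Prop := out = select_extract_entities_alt src_phrase
instance (src_phrase : List String × List String) (out : List (String × Int)) : Decidable (Spec_select_extract_entities src_phrase out) := by unfold Spec_select_extract_entities; infer_instance

-- ===== CLAIM (what is proved, stated in full; the proofs are below) =====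
def Claim_equal_select_extract_entities : Prop := ∀ (src_phrase : List String × List String), Dom_select_extract_entities src_phrase → Pre_select_extract_entities src_phrase → Spec_select_extract_entities src_phrase (select_extract_entities src_phrase)

-- ===== LEMMAS AND PROOFS =====

-- 'some occurrence of w among positions < p has an in-range type containing NNP'
def seeQP (phrase typ : List String) (p : Nat) (w : String) : Prop :=
  ∃ i < p, phrase.getD i "" = w ∧ i < typ.length ∧ PySem.Str.isIn "NNP" (typ.getD i "") = true

theorem seeQP_succ (phrase typ : List String) (p : Nat) (w : String) :
    seeQP phrase typ (p + 1) w ↔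
      seeQP phrase typ p w ∨
        (phrase.getD p "" = w ∧ p < typ.length ∧ PySem.Str.isIn "NNP" (typ.getD p "") = true) := by
  constructor
  · rintro ⟨i, hi, h⟩
    rcases Nat.lt_succ_iff_lt_or_eq.mp hi with hi' | rfl
    · exact Or.inl ⟨i, hi', h⟩
    · exact Or.inr h
  · rintro (⟨i, hi, h⟩ | h)
    · exact ⟨i, Nat.lt_succ_of_lt hi, h⟩
    · exact ⟨p, Nat.lt_succ_self p, h⟩

-- A's dict loop: under Pre_, it returns a dict whose NNP-status per word is exactly seeQP at length.
theorem seeDictLoop_spec (phrase typ : List String)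
    (hpre : Pre_select_extract_entities (phrase, typ)) :
    ∀ (k p : Nat), p + k = phrase.length →
    ∀ d : PySem.Dict String String,
    (∀ w, (∃ t, d.get? w = some t ∧ PySem.Str.isIn "NNP" t = true) ↔ seeQP phrase typ p w) →
    (∀ i < p, d.contains (phrase.getD i "") = true) →
    ∃ d', seeDictLoop phrase typ (List.range' p k) d = some d' ∧
      (∀ w, (∃ t, d'.get? w = some t ∧ PySem.Str.isIn "NNP" t = true) ↔
        seeQP phrase typ phrase.length w) ∧
      (∀ i < phrase.length, d'.contains (phrase.getD i "") = true) := by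
  intro k
  induction k with
  | zero =>
    intro p hp d h1 h2
    simp only [List.range'] at *
    exact ⟨d, by simp [seeDictLoop], by rw [← hp, Nat.add_zero]; exact fun w => h1 w,
      by rw [← hp, Nat.add_zero]; exact h2⟩
  | succ k ih =>
    intro p hp d h1 h2
    have hpn : p < phrase.length := by omega
    rw [List.range'_succ]
    set w0 := phrase.getD p "" with hw0
    rcases hfz : ((d.get? w0).elim false (fun t => PySem.Str.isIn "NNP" t)) with _ | _
    · -- not frozen: A reads typ[p]
      have hnq : ¬ seeQP phrase typ p w0 := by
        intro hq
        rcases (h1 w0).mpr hq with ⟨t, ht, hn⟩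
        rw [ht] at hfz
        simp only [Option.elim] at hfz
        rw [hn] at hfz; cases hfz
      have hplt : p < typ.length := by
        rcases hpre p hpn with h | ⟨j, hj, hjt, hje, hjn⟩
        · exact h
        · exact absurd ⟨j, hj, hje, hjt, hjn⟩ hnq
      have hget : PySem.List.pyGet? typ ((p : Nat) : Int) = some (typ.getD p "") := by
        rw [PySem.List.pyGet?_natCast, List.getElem?_eq_getElem hplt,
          List.getD_eq_getElem _ _ hplt]
      simp only [seeDictLoop, hfz, Bool.false_eq_true, if_false, ← hw0, hget]
      apply ih (p + 1) (by omega)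
      · intro w
        rw [seeQP_succ]
        by_cases hw : w = w0
        · subst hw
          rw [PySem.Dict.get?_insert_self]
          constructor
          · rintro ⟨t, ht, hn⟩
            cases ht
            exact Or.inr ⟨rfl, hplt, hn⟩
          · rintro (hq | ⟨_, _, hn⟩)
            · exact absurd hq hnq
            · exact ⟨typ.getD p "", rfl, hn⟩
        · rw [PySem.Dict.get?_insert_of_ne _ _ hw]
          constructor
          · intro h; exact Or.inl ((h1 w).mp h)
          · rintro (hq | ⟨he, _, _⟩)
            · exact (h1 w).mpr hq
            · exact absurd he.symm hw
      · intro i hi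
        rw [PySem.Dict.contains_insert]
        rcases Nat.lt_succ_iff_lt_or_eq.mp hi with hi' | rfl
        · rw [h2 i hi']; simp
        · simp [hw0]
    · -- frozen: skip
      simp only [seeDictLoop, hfz, if_true, ← hw0]
      have hq0 : seeQP phrase typ p w0 :=
        (h1 w0).mp (by
          rcases hg : d.get? w0 with _ | t
          · rw [hg] at hfz; cases hfz
          · rw [hg] at hfz; exact ⟨t, rfl, hfz⟩)
      apply ih (p + 1) (by omega)
      · intro w
        rw [seeQP_succ]
        by_cases hw : w = w0
        · subst hw
          constructor
          · intro h; exact Or.inl ((h1 w0).mp h)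
          · intro _; exact (h1 w0).mpr hq0
        · constructor
          · intro h; exact Or.inl ((h1 w).mp h)
          · rintro (hq | ⟨he, _, _⟩)
            · exact (h1 w).mpr hq
            · exact absurd he.symm hw
      · intro i hi
        rcases Nat.lt_succ_iff_lt_or_eq.mp hi with hi' | rfl
        · exact h2 i hi'
        · rcases (h1 w0).mpr hq0 with ⟨t, ht, _⟩
          rw [PySem.Dict.contains_eq_isSome_get?, ht]; rfl

-- B's any-scan over the suffix of enumerate(phrase) from position p: under Pre_ and
-- 'no NNP occurrence of w before p', it returns some b with b ↔ seeQP at length.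
theorem altAnyNNP_spec (phrase typ : List String)
    (hpre : Pre_select_extract_entities (phrase, typ)) (w : String) :
    ∀ (k p : Nat), p + k = phrase.length →
    (∀ j < p, phrase.getD j "" = w →
      ¬(j < typ.length ∧ PySem.Str.isIn "NNP" (typ.getD j "") = true)) →
    ∃ b, altAnyNNP typ w (PySem.List.enumerate (phrase.drop p) (p : Int)) = some b ∧
      (b = true ↔ seeQP phrase typ phrase.length w) := by
  intro k
  induction k with
  | zero =>
    intro p hp hno
    have hd : phrase.drop p = [] := List.drop_eq_nil_of_le (by omega)
    rw [hd, PySem.List.enumerate_nil]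
    refine ⟨false, rfl, ?_⟩
    simp only [Bool.false_eq_true, false_iff]
    rintro ⟨i, hi, he, hr⟩
    exact hno i (by omega) he hr
  | succ k ih =>
    intro p hp hno
    have hpn : p < phrase.length := by omega
    rw [List.drop_eq_getElem_cons hpn, PySem.List.enumerate_cons]
    simp only [altAnyNNP]
    have hg : phrase[p] = phrase.getD p "" := (List.getD_eq_getElem _ _ hpn).symm
    by_cases hw : phrase[p] = w
    · simp only [hw, BEq.rfl, if_true]
      by_cases hplt : p < typ.length
      · have hget : PySem.List.pyGet? typ ((p : Nat) : Int) = some (typ.getD p "") := by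
          rw [PySem.List.pyGet?_natCast, List.getElem?_eq_getElem hplt,
            List.getD_eq_getElem _ _ hplt]
        rw [hget]
        rcases hn : PySem.Str.isIn "NNP" (typ.getD p "") with _ | _
        · simp only [hn, Bool.false_eq_true, if_false]
          have : ((p : Int) + 1) = (((p + 1 : Nat)) : Int) := by push_cast; ring
          rw [this]
          apply ih (p + 1) (by omega)
          intro j hj hje
          rcases Nat.lt_succ_iff_lt_or_eq.mp hj with hj' | rfl
          · exact hno j hj' hje
          · rintro ⟨_, hr⟩; rw [hn] at hr; cases hr
        · simp only [hn, if_true]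
          exact ⟨true, rfl, by
            simp only [true_iff]
            exact ⟨p, hpn, by rw [← hg, hw], hplt, hn⟩⟩
      · exfalso
        rcases hpre p hpn with h | ⟨j, hj, hjt, hje, hjn⟩
        · exact hplt h
        · exact hno j (by omega) (by rw [hje, ← hg, hw]) ⟨hjt, hjn⟩
    · have hbeq : (phrase[p] == w) = false := beq_eq_false_iff_ne.mpr hw
      simp only [hbeq, Bool.false_eq_true, if_false]
      have : ((p : Int) + 1) = (((p + 1 : Nat)) : Int) := by push_cast; ring
      rw [this]
      apply ih (p + 1) (by omega)
      intro j hj hje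
      rcases Nat.lt_succ_iff_lt_or_eq.mp hj with hj' | rfl
      · exact hno j hj' hje
      · rw [← hg] at hje; exact absurd hje hw

-- B's key loop computed as A's second-loop foldl, once every key's scan result is known.
theorem altKeyLoop_eq_foldl (phrase typ : List String) (f : String → Bool) :
    ∀ (keys : List String) (o : PySem.Dict String Int),
    (∀ k ∈ keys, altAnyNNP typ k (PySem.List.enumerate phrase) = some (f k)) →
    altKeyLoop phrase typ keys o =
      some (keys.foldl (fun o k => if f k then o.insert k (1 : Int) else o) o) := by
  intro keys
  induction keys with
  | nil => intro o _; rfl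
  | cons k rest ih =>
    intro o hall
    simp only [altKeyLoop, hall k (List.mem_cons_self), List.foldl_cons]
    exact ih _ (fun k' hk' => hall k' (List.mem_cons_of_mem _ hk'))

-- ===== VERDICT (by name: the statement is the Claim_ definition above) =====
theorem select_extract_entities_spec : Claim_equal_select_extract_entities := by
  unfold Claim_equal_select_extract_entities
  intro src_phrase _ hpre
  obtain ⟨phrase, typ⟩ := src_phrase
  unfold Spec_select_extract_entities select_extract_entities select_extract_entities_alt
  simp only []
  -- A's first loop succeeds and characterises its dict
  have h0 : ∀ w, (∃ t, (PySem.Dict.empty : PySem.Dict String String).get? w = some t ∧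
      PySem.Str.isIn "NNP" t = true) ↔ seeQP phrase typ 0 w := by
    intro w
    constructor
    · rintro ⟨t, ht, _⟩; rw [PySem.Dict.get?_empty] at ht; cases ht
    · rintro ⟨i, hi, _⟩; omega
  obtain ⟨d, hd, hNNP, hcont⟩ :=
    seeDictLoop_spec phrase typ hpre phrase.length 0 (by omega) PySem.Dict.empty h0
      (by intro i hi; omega)
  rw [List.range_eq_range', hd]
  -- per counter key, B's scan returns exactly A's stored-type NNP test
  have hkey : ∀ k ∈ (PySem.Dict.counter phrase : PySem.Dict String Int).keys,
      altAnyNNP typ k (PySem.List.enumerate phrase) =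
        some (PySem.Str.isIn "NNP" ((d.get? k).getD "")) := by
    intro k hk
    rw [PySem.Dict.keys_counter] at hk
    have hkph : k ∈ phrase := (PySem.Set.mem_ofList _ _).mp hk
    rcases List.mem_iff_getElem.mp hkph with ⟨i, hi, hki⟩
    have hc : d.contains k = true := by
      have := hcont i hi
      rwa [List.getD_eq_getElem _ _ hi, hki] at this
    rw [PySem.Dict.contains_eq_isSome_get?] at hc
    rcases hg : d.get? k with _ | t
    · rw [hg] at hc; cases hc
    · obtain ⟨b, hb, hbq⟩ := altAnyNNP_spec phrase typ hpre k phrase.length 0 (by omega)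
        (by intro j hj; omega)
      simp only [List.drop_zero, Nat.cast_zero] at hb
      rw [hb, Option.getD_some]
      congr 1
      have htq : PySem.Str.isIn "NNP" t = true ↔ seeQP phrase typ phrase.length k :=
        ⟨fun h => (hNNP k).mp ⟨t, hg, h⟩, fun hq => by
          rcases (hNNP k).mpr hq with ⟨t', ht', hn'⟩
          rw [hg] at ht'; cases ht'; exact hn'⟩
      rcases hbv : b with _ | _
      · rcases hnv : PySem.Str.isIn "NNP" t with _ | _
        · rfl
        · rw [hbv] at hbq
          exact absurd (hbq.mpr (htq.mp hnv)) (by simp)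
      · rw [hbv] at hbq
        exact (htq.mpr (hbq.mp rfl)).symm
  rw [altKeyLoop_eq_foldl phrase typ
    (fun k => PySem.Str.isIn "NNP" ((d.get? k).getD "")) _ _ hkey]
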